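-- pv_equiv track=rewrite | github.com/Karthikdude/OpenX | utils/evasion/waf_bypass.py | _hex_encode
-- ===== SOURCE A (Python) =====
-- def _hex_encode(text: str) -> str:
--     """Hex encode the text"""
--     # Convert to hex but keep the structure
--     parts = []
--     for part in text.split('&'):
--         if '=' in part:
--             key, value = part.split('=', 1)
--             hex_value = ''.join([f'%{ord(c):02X}' for c in value])
--             parts.append(f"{key}={hex_value}")
--         else:
--             parts.append(part)
--
--     return '&'.join(parts)
-- ===== SOURCE B (Python) =====
-- def _hex_encode(text: str) -> str:
--     # Single pass over the characters with a one-bit state: after the first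
--     # '=' of each '&'-segment we hex-encode every char until the next '&'.
--     out = []
--     encoding = False
--     for c in text:
--         if encoding:
--             if c == '&':
--                 encoding = False
--                 out.append(c)
--             else:
--                 out.append(f'%{ord(c):02X}')
--         else:
--             if c == '=':
--                 encoding = True
--                 out.append(c)
--             else:
--                 out.append(c)
--     return ''.join(out)
-- ===== Notes on version B (the rewrite author's own statement) =====
-- stated objective: alternative
-- what changed: Replaces split('&')/per-part split('=',1)/join with a single left-to-right scan over the characters driven by a one-bit state (hex-encode after the first '=' of each '&'-segment until the next '&'), so no intermediate part lists are built.
import Mathlib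
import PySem

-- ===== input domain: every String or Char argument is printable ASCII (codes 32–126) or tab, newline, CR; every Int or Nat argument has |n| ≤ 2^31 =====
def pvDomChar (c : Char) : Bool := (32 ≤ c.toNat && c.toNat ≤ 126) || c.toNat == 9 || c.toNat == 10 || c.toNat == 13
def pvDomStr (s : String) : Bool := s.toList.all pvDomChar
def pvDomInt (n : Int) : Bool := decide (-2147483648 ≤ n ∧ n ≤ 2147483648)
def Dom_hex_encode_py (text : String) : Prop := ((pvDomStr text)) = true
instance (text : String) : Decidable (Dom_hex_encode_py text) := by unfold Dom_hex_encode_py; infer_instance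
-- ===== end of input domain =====

-- B replaces A's split('&') / split('=',1) / join pipeline by one left-to-right scan with a
-- one-bit state (hex-encode after the first '=' of a '&'-segment until the next '&'); return
-- values are proved equal on all inputs of the domain.

-- shared leaf helper: f'%{ord(c):02X}' (exact for ord(c) < 256, which covers the ASCII domain)
def pvHexDigit (n : Nat) : Char := if n < 10 then Char.ofNat (48 + n) else Char.ofNat (55 + n)
def pvHexChar (c : Char) : List Char := ['%', pvHexDigit (c.toNat / 16), pvHexDigit (c.toNat % 16)]

-- ===== PORT A =====
-- body of A's loop: if '=' in part: key, value = part.split('=', 1); hex the value; else keep part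
def pvAPartEnc (part : List Char) : List Char :=
  if PySem.Chars.isIn ['='] part then
    match PySem.Chars.splitOnMax part ['='] 1 with
    | [key, value] => key ++ '=' :: value.flatMap pvHexChar   -- f"{key}={hex_value}"
    | _ => []  -- unreachable: split('=', 1) with '=' in part yields exactly two pieces
  else part

def hex_encode_py (text : String) : String :=
  String.ofList (PySem.Chars.join ['&']
    ((PySem.Chars.splitOn text.toList ['&']).map pvAPartEnc))

-- ===== PORT B =====
-- Source B's for-loop: foldl over the characters, state = (encoding flag, output so far)
def pvBStep (st : Bool × List Char) (c : Char) : Bool × List Char :=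
  if st.1 then
    if c = '&' then (false, st.2 ++ [c]) else (true, st.2 ++ pvHexChar c)
  else
    if c = '=' then (true, st.2 ++ [c]) else (false, st.2 ++ [c])

def hex_encode_py_alt (text : String) : String :=
  String.ofList ((text.toList.foldl pvBStep (false, [])).2)

-- ===== PRECONDITION & SPEC =====
def Spec_hex_encode_py (text : String) (out : String) : Prop := out = hex_encode_py_alt text
instance (text : String) (out : String) : Decidable (Spec_hex_encode_py text out) := by unfold Spec_hex_encode_py; infer_instance

-- ===== CLAIM (what is proved, stated in full; the proofs are below) =====
def Claim_equal_hex_encode_py : Prop := ∀ (text : String), Dom_hex_encode_py text → Spec_hex_encode_py text (hex_encode_py text)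

-- ===== LEMMAS AND PROOFS =====

-- proof-side recursive picture of B's scan
mutual
def pvScanK : List Char → List Char
  | [] => []
  | c :: rest => if c = '=' then '=' :: pvEncV rest else c :: pvScanK rest
def pvEncV : List Char → List Char
  | [] => []
  | c :: rest => if c = '&' then '&' :: pvScanK rest else pvHexChar c ++ pvEncV rest
end

-- proof-side recursive picture of splitOn _ ['&'] (pre = current piece built so far)
def pvSplitA (pre : List Char) : List Char → List (List Char)
  | [] => [pre]
  | c :: rest => if c = '&' then pre :: pvSplitA [] rest else pvSplitA (pre ++ [c]) rest

-- proof-side recursive picture of splitOnMax _ ['='] 1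
def pvSplit1 (pre : List Char) : List Char → List (List Char)
  | [] => [pre]
  | c :: rest => if c = '=' then [pre, rest] else pvSplit1 (pre ++ [c]) rest

theorem pvFoldB (l : List Char) : ∀ (enc : Bool) (acc : List Char),
    (l.foldl pvBStep (enc, acc)).2 = acc ++ (if enc then pvEncV l else pvScanK l) := by
  induction l with
  | nil => intro enc acc; cases enc <;> simp [pvEncV, pvScanK]
  | cons c rest ih =>
    intro enc acc
    cases enc <;> simp only [List.foldl_cons, pvBStep, pvScanK, pvEncV]
    · by_cases h : c = '=' <;> simp [h, ih, List.append_assoc]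
    · by_cases h : c = '&' <;> simp [h, ih, List.append_assoc]

theorem pvGoAmp (l : List Char) : ∀ (fuel : Nat) (cur : List Char) (acc : List (List Char)),
    l.length ≤ fuel →
    PySem.Chars.splitOn.go ['&'] fuel l cur acc = acc.reverse ++ pvSplitA cur.reverse l := by
  induction l with
  | nil =>
    intro fuel cur acc _
    cases fuel <;> simp [PySem.Chars.splitOn.go, pvSplitA]
  | cons c rest ih =>
    intro fuel cur acc h
    cases fuel with
    | zero => simp at h
    | succ f =>
      rw [PySem.Chars.splitOn.go]
      by_cases hc : c = '&'
      · subst hc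
        simp only [List.isPrefixOf_cons₂, List.isPrefixOf_nil_left, Bool.and_true, beq_self_eq_true,
          if_pos, List.length_singleton, List.drop_succ_cons, List.drop_zero]
        rw [ih f [] (cur.reverse :: acc) (by simpa using Nat.le_of_succ_le_succ (by simpa using h))]
        simp [pvSplitA]
      · have : (['&'].isPrefixOf (c :: rest)) = false := by
          simp [List.isPrefixOf_cons₂]; exact fun h' => absurd h'.symm hc
        rw [this]
        simp only [Bool.false_eq_true, if_neg, not_false_iff]
        rw [ih f (c :: cur) acc (by simpa using Nat.le_of_succ_le_succ (by simpa using h))]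
        simp [pvSplitA, hc]

theorem pvSplitOnAmp (l : List Char) :
    PySem.Chars.splitOn l ['&'] = pvSplitA [] l := by
  unfold PySem.Chars.splitOn
  rw [pvGoAmp l (l.length + 1) [] [] (Nat.le_succ _)]
  simp

theorem pvGo1Zero (fuel : Nat) (l cur : List Char) (acc : List (List Char)) :
    PySem.Chars.splitOnMax.go ['='] fuel 0 l cur acc = acc.reverse ++ [cur.reverse ++ l] := by
  cases fuel <;> cases l <;> simp [PySem.Chars.splitOnMax.go]

theorem pvGo1One (l : List Char) : ∀ (fuel : Nat) (cur : List Char) (acc : List (List Char)),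
    l.length ≤ fuel →
    PySem.Chars.splitOnMax.go ['='] fuel 1 l cur acc = acc.reverse ++ pvSplit1 cur.reverse l := by
  induction l with
  | nil =>
    intro fuel cur acc _
    cases fuel <;> simp [PySem.Chars.splitOnMax.go, pvSplit1]
  | cons c rest ih =>
    intro fuel cur acc h
    cases fuel with
    | zero => simp at h
    | succ f =>
      rw [PySem.Chars.splitOnMax.go]
      by_cases hc : c = '='
      · subst hc
        simp only [List.isPrefixOf_cons₂, List.isPrefixOf_nil_left, Bool.and_true, beq_self_eq_true,
          if_pos, List.length_singleton, List.drop_succ_cons, List.drop_zero, one_ne_zero, if_neg,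
          not_false_iff]
        rw [pvGo1Zero]
        simp [pvSplit1]
      · have : (['='].isPrefixOf (c :: rest)) = false := by
          simp [List.isPrefixOf_cons₂]; exact fun h' => absurd h'.symm hc
        rw [this]
        simp only [one_ne_zero, if_neg, not_false_iff, Bool.false_eq_true]
        rw [ih f (c :: cur) acc (by simpa using Nat.le_of_succ_le_succ (by simpa using h))]
        simp [pvSplit1, hc]

theorem pvSplitOnMax1 (l : List Char) :
    PySem.Chars.splitOnMax l ['='] 1 = pvSplit1 [] l := by
  unfold PySem.Chars.splitOnMax
  rw [if_neg (by norm_num)]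
  simp only [Int.toNat_one]
  rw [pvGo1One l _ [] [] (by omega)]
  simp

theorem pvIsInSingleton (a : Char) (l : List Char) :
    PySem.Chars.isIn [a] l = true ↔ a ∈ l := by
  rw [PySem.Chars.isIn_iff_infix]
  constructor
  · intro h
    have := h.sublist
    simpa using this
  · intro h
    obtain ⟨s, t, rfl⟩ := List.append_of_mem h
    exact ⟨s, t, by simp⟩

theorem pvExistsFirst (a : Char) (l : List Char) (h : a ∈ l) :
    ∃ k v, l = k ++ a :: v ∧ a ∉ k := by
  induction l with
  | nil => simp at h
  | cons c rest ih =>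
    by_cases hc : c = a
    · exact ⟨[], rest, by simp [hc], by simp⟩
    · have h' : a ∈ rest := by
        rcases List.mem_cons.mp h with h1 | h1
        · exact absurd h1.symm hc
        · exact h1
      obtain ⟨k, v, rfl, hk⟩ := ih h'
      refine ⟨c :: k, v, rfl, ?_⟩
      intro hm
      rcases List.mem_cons.mp hm with h1 | h1
      · exact hc h1.symm
      · exact hk h1

theorem pvSplit1Eq (k : List Char) : ∀ pre v, '=' ∉ k →
    pvSplit1 pre (k ++ '=' :: v) = [pre ++ k, v] := by
  induction k with
  | nil => intro pre v _; simp [pvSplit1]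
  | cons c rest ih =>
    intro pre v h
    have hc : c ≠ '=' := fun hc => h (by simp [hc])
    simp [pvSplit1, hc, ih _ _ (fun hm => h (by simp [hm]))]

theorem pvPartEncNoEq (p : List Char) (h : '=' ∉ p) : pvAPartEnc p = p := by
  unfold pvAPartEnc
  rw [if_neg]
  intro hin
  exact h ((pvIsInSingleton '=' p).mp hin)

theorem pvPartEncEq (k v : List Char) (h : '=' ∉ k) :
    pvAPartEnc (k ++ '=' :: v) = k ++ '=' :: v.flatMap pvHexChar := by
  unfold pvAPartEnc
  rw [if_pos ((pvIsInSingleton '=' _).mpr (by simp))]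
  rw [pvSplitOnMax1, pvSplit1Eq k [] v h]
  simp

theorem pvScanKNoEq (a : List Char) : ∀ t, '=' ∉ a → pvScanK (a ++ t) = a ++ pvScanK t := by
  induction a with
  | nil => intro t _; simp
  | cons c rest ih =>
    intro t h
    have hc : c ≠ '=' := fun hc => h (by simp [hc])
    simp [pvScanK, hc, ih t (fun hm => h (by simp [hm]))]

theorem pvEncVNoAmp (v : List Char) : ∀ t, '&' ∉ v →
    pvEncV (v ++ t) = v.flatMap pvHexChar ++ pvEncV t := by
  induction v with
  | nil => intro t _; simp
  | cons c rest ih =>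
    intro t h
    have hc : c ≠ '&' := fun hc => h (by simp [hc])
    simp [pvEncV, hc, ih t (fun hm => h (by simp [hm])), List.append_assoc]

theorem pvScanKSeg (p : List Char) (hamp : '&' ∉ p) : pvScanK p = pvAPartEnc p := by
  by_cases heq : '=' ∈ p
  · obtain ⟨k, v, rfl, hk⟩ := pvExistsFirst '=' p heq
    have hv : '&' ∉ v := fun hm => hamp (by simp [hm])
    rw [pvScanKNoEq k _ hk, pvPartEncEq k v hk]
    have : pvScanK ('=' :: v) = '=' :: pvEncV v := by simp [pvScanK]
    rw [this]
    have := pvEncVNoAmp v [] hv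
    simp only [List.append_nil] at this
    rw [this]
    simp [pvEncV]
  · rw [pvPartEncNoEq p heq]
    have := pvScanKNoEq p [] heq
    simpa [pvScanK] using this

theorem pvSplitANoAmp (l : List Char) : ∀ pre, '&' ∉ l → pvSplitA pre l = [pre ++ l] := by
  induction l with
  | nil => intro pre _; simp [pvSplitA]
  | cons c rest ih =>
    intro pre h
    have hc : c ≠ '&' := fun hc => h (by simp [hc])
    simp [pvSplitA, hc, ih _ (fun hm => h (by simp [hm]))]

theorem pvSplitAAmp (a : List Char) : ∀ pre b, '&' ∉ a →
    pvSplitA pre (a ++ '&' :: b) = (pre ++ a) :: pvSplitA [] b := by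
  induction a with
  | nil => intro pre b _; simp [pvSplitA]
  | cons c rest ih =>
    intro pre b h
    have hc : c ≠ '&' := fun hc => h (by simp [hc])
    simp [pvSplitA, hc, ih _ _ (fun hm => h (by simp [hm]))]

theorem pvSplitANeNil (pre : List Char) (l : List Char) : pvSplitA pre l ≠ [] := by
  induction l generalizing pre with
  | nil => simp [pvSplitA]
  | cons c rest ih =>
    by_cases hc : c = '&' <;> simp [pvSplitA, hc, ih]

theorem pvJoinAmpCons (x : List Char) (ys : List (List Char)) (h : ys ≠ []) :
    PySem.Chars.join ['&'] (x :: ys) = x ++ '&' :: PySem.Chars.join ['&'] ys := by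
  obtain ⟨y, ys', rfl⟩ := List.exists_cons_of_ne_nil h
  rw [PySem.Chars.join_cons_cons]
  simp

theorem pvMain (n : Nat) : ∀ (cs : List Char), cs.length ≤ n →
    pvScanK cs = PySem.Chars.join ['&'] ((pvSplitA [] cs).map pvAPartEnc) := by
  induction n with
  | zero =>
    intro cs h
    have : cs = [] := List.eq_nil_of_length_eq_zero (Nat.le_zero.mp h)
    subst this
    simp [pvSplitA, pvScanK, PySem.Chars.join_singleton, pvPartEncNoEq]
  | succ n ih =>
    intro cs hlen
    by_cases hamp : '&' ∈ cs
    · obtain ⟨a, b, rfl, ha⟩ := pvExistsFirst '&' cs hamp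
      rw [pvSplitAAmp a [] b ha]
      simp only [List.nil_append, List.map_cons]
      rw [pvJoinAmpCons _ _ (by simp; exact fun h => pvSplitANeNil [] b (by simp [h]))]
      have hb : pvScanK b = PySem.Chars.join ['&'] ((pvSplitA [] b).map pvAPartEnc) := by
        apply ih
        have : (a ++ '&' :: b).length = a.length + 1 + b.length := by simp; omega
        omega
      rw [← hb]
      by_cases heq : '=' ∈ a
      · obtain ⟨k, v, rfl, hk⟩ := pvExistsFirst '=' a heq
        have hv : '&' ∉ v := fun hm => ha (by simp [hm])
        rw [pvPartEncEq k v hk]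
        have h1 : (k ++ '=' :: v) ++ '&' :: b = k ++ '=' :: (v ++ '&' :: b) := by simp
        rw [h1, pvScanKNoEq k _ hk]
        have h2 : pvScanK ('=' :: (v ++ '&' :: b)) = '=' :: pvEncV (v ++ '&' :: b) := by
          simp [pvScanK]
        rw [h2, pvEncVNoAmp v _ hv]
        have h3 : pvEncV ('&' :: b) = '&' :: pvScanK b := by simp [pvEncV]
        rw [h3]
        simp
      · rw [pvPartEncNoEq a heq, pvScanKNoEq a _ heq]
        have : pvScanK ('&' :: b) = '&' :: pvScanK b := by
          simp [pvScanK]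
        rw [this]
    · rw [pvSplitANoAmp cs [] hamp]
      simp only [List.nil_append, List.map_cons, List.map_nil]
      rw [PySem.Chars.join_singleton]
      exact pvScanKSeg cs hamp

-- ===== VERDICT (by name: the statement is the Claim_ definition above) =====
theorem hex_encode_py_spec : Claim_equal_hex_encode_py := by
  intro text _
  unfold Spec_hex_encode_py hex_encode_py hex_encode_py_alt
  rw [pvFoldB, pvSplitOnAmp, ← pvMain text.toList.length text.toList (le_refl _)]
  simp
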